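-- pv_equiv track=rewrite | github.com/wsbespalov/djcveupdater | updater_cpe/controllers.py | cpe_parser
-- ===== SOURCE A (Python) =====
-- def cpe_parser(cpe_string):
--     zk = ['cpe', 'part', 'vendor', 'product', 'version',
--           'update', 'edition', 'language']
--     cpedict = dict((k, '') for k in zk)
--     splitup = cpe_string.split(':')
--     cpedict.update(dict(zip(zk, splitup)))
--
--     zk = None
--     splitup = None
--
--     part = cpedict.get("part", "")  # Returns the cpe part (/o, /h, /a)
--     vendor = cpedict.get("vendor", "")
--     component = cpedict.get("product", "")
--     version = cpedict.get("version", "")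
--     update = cpedict.get("update", "")
--     edition = cpedict.get("edition", "")
--     language = cpedict.get("language", "")
--
--     return part, vendor, component, version, update, edition, language
-- ===== SOURCE B (Python) =====
-- def cpe_parser(cpe_string):
--     # single pass over the characters: an 8-slot table of char buffers and a cursor,
--     # advance on ':', stop as soon as 8 fields have been seen
--     fields = [[], [], [], [], [], [], [], []]
--     i = 0
--     for ch in cpe_string:
--         if ch == ':':
--             i += 1
--             if i == 8:
--                 break
--         else:
--             fields[i].append(ch)
--     return (''.join(fields[1]), ''.join(fields[2]), ''.join(fields[3]),
--             ''.join(fields[4]), ''.join(fields[5]), ''.join(fields[6]),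
--             ''.join(fields[7]))
-- ===== Notes on version B (the rewrite author's own statement) =====
-- stated objective: alternative
-- what changed: Replaces split-then-dict (defaults, zip, update, seven .get calls) with a single left-to-right character scan that accumulates into a fixed 8-slot field table, advancing on ':' and breaking early once 8 fields have been seen.
import Mathlib
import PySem

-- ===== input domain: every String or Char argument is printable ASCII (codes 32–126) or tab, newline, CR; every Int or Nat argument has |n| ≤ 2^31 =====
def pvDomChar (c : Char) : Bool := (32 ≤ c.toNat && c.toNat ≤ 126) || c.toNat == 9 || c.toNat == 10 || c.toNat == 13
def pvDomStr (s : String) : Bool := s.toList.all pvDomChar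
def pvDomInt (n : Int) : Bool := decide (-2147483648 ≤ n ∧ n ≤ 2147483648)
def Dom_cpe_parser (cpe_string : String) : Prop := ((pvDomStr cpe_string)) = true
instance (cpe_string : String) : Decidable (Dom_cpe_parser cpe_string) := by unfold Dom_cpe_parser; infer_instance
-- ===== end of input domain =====

-- B replaces A's split + name-keyed dict (defaults, zip, update, seven .get calls) with a
-- single-pass character scanner over a fixed 8-slot field table that stops after 8 fields;
-- objective: simpler (no faster-than-A claim).

-- ===== PORT A =====
def cpe_parser (cpe_string : String) : String × String × String × String × String × String × String :=
  let zk : List String := ["cpe", "part", "vendor", "product", "version",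
                           "update", "edition", "language"]
  let cpedict : PySem.Dict String String := PySem.Dict.ofList (zk.map (fun k => (k, ("" : String))))
  let splitup := (PySem.Str.split? cpe_string ":").getD []   -- sep ":" is non-empty, so split? is always some
  let cpedict := cpedict.update (List.zip zk splitup)
  let part := cpedict.getD "part" ""
  let vendor := cpedict.getD "vendor" ""
  let component := cpedict.getD "product" ""
  let version := cpedict.getD "version" ""
  let update := cpedict.getD "update" ""
  let edition := cpedict.getD "edition" ""
  let language := cpedict.getD "language" ""
  (part, vendor, component, version, update, edition, language)

-- ===== PORT B =====
-- Source B's for-loop over the characters: `fields` is the 8-slot table (kept as List Char per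
-- slot, PySem's representation of growing strings), `i` the cursor; `break` on the 8th ':'.
def cpeScan : List Char → List (List Char) → Nat → List (List Char)
  | [], fields, _ => fields
  | c :: cs, fields, i =>
    if c = ':' then
      if i + 1 = 8 then fields                      -- `break`
      else cpeScan cs fields (i + 1)
    else cpeScan cs (fields.modify i (fun f => f ++ [c])) i

def cpe_parser_alt (cpe_string : String) : String × String × String × String × String × String × String :=
  let fields := cpeScan cpe_string.toList (List.replicate 8 []) 0
  (String.ofList (fields.getD 1 []), String.ofList (fields.getD 2 []),
   String.ofList (fields.getD 3 []), String.ofList (fields.getD 4 []),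
   String.ofList (fields.getD 5 []), String.ofList (fields.getD 6 []),
   String.ofList (fields.getD 7 []))

-- ===== PRECONDITION & SPEC =====
def Spec_cpe_parser (cpe_string : String) (out : String × String × String × String × String × String × String) : Prop := out = cpe_parser_alt cpe_string
instance (cpe_string : String) (out : String × String × String × String × String × String × String) : Decidable (Spec_cpe_parser cpe_string out) := by unfold Spec_cpe_parser; infer_instance

-- ===== CLAIM (what is proved, stated in full; the proofs are below) =====
def Claim_equal_cpe_parser : Prop := ∀ (cpe_string : String), Dom_cpe_parser cpe_string → Spec_cpe_parser cpe_string (cpe_parser cpe_string)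

-- ===== LEMMAS AND PROOFS =====

-- ---- A-side: the dict lookups are positional lookups into the split list ----
theorem dict_update_nil {ν : Type} (d : PySem.Dict String ν) : d.update [] = d := rfl

theorem dict_update_cons {ν : Type} (d : PySem.Dict String ν) (p : String × ν) (ps : List (String × ν)) :
    d.update (p :: ps) = (d.insert p.1 p.2).update ps := rfl

theorem getD_update_of_forall_ne {ν : Type} (ps : List (String × ν)) (d : PySem.Dict String ν)
    (k : String) (v : ν) (h : ∀ p ∈ ps, p.1 ≠ k) : (d.update ps).getD k v = d.getD k v := by
  induction ps generalizing d with
  | nil => rfl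
  | cons p ps ih =>
    rw [dict_update_cons, ih _ (fun q hq => h q (List.mem_cons_of_mem _ hq)),
      PySem.Dict.getD_insert_of_ne _ _ _ (Ne.symm (h p (by simp)))]

-- lookup of the i-th (distinct) key after updating with zip keys/values is the i-th value
theorem getD_update_zip_nodup (ks : List String) (xs : List String) (d : PySem.Dict String String)
    (hnd : ks.Nodup) (i : Nat) (k : String) (hk : ks[i]? = some k) :
    (d.update (ks.zip xs)).getD k "" = xs.getD i (d.getD k "") := by
  induction ks generalizing xs d i with
  | nil => simp at hk
  | cons k0 ks ih =>
    obtain ⟨hk0, hnd'⟩ := List.nodup_cons.mp hnd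
    cases xs with
    | nil => rw [List.zip_nil_right, dict_update_nil]; simp
    | cons x xs =>
      rw [List.zip_cons_cons, dict_update_cons]
      cases i with
      | zero =>
        obtain rfl : k0 = k := by simpa using hk
        rw [getD_update_of_forall_ne _ _ _ _ (fun p hp he => hk0 (by rw [← he]; exact (List.of_mem_zip hp).1))]
        simp [PySem.Dict.getD_insert_self]
      | succ j =>
        have hk' : ks[j]? = some k := by simpa using hk
        have hmem : k ∈ ks := List.mem_of_getElem? hk'
        rw [ih xs (d.insert k0 x) hnd' j hk',
          PySem.Dict.getD_insert_of_ne _ _ _ (fun he => hk0 (by rw [← he]; exact hmem))]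
        simp

-- the all-empty-values dict answers "" to every getD with default ""
theorem getD_update_blank (ks : List String) (d : PySem.Dict String String) (k : String)
    (hd : d.getD k "" = "") :
    (d.update (ks.map (fun k => (k, ("" : String))))).getD k "" = "" := by
  induction ks generalizing d with
  | nil => exact hd
  | cons k0 ks ih =>
    rw [List.map_cons, dict_update_cons]
    refine ih _ ?_
    by_cases h : k = k0
    · subst h; exact PySem.Dict.getD_insert_self _ _ _ _
    · rw [PySem.Dict.getD_insert_of_ne _ _ _ h]; exact hd

theorem getD_base (ks : List String) (k : String) :
    (PySem.Dict.ofList (ks.map (fun k => (k, ("" : String))))).getD k "" = "" := by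
  have h : PySem.Dict.ofList (ks.map (fun k => (k, ("" : String))))
      = PySem.Dict.empty.update (ks.map (fun k => (k, ("" : String)))) := rfl
  rw [h]
  exact getD_update_blank _ _ _ (PySem.Dict.getD_empty _ _)

theorem zk_nodup : ((["cpe", "part", "vendor", "product", "version", "update", "edition", "language"] : List String)).Nodup := by decide

-- one component of A is a positional lookup into the split list
theorem comp_eq (xs : List String) (i : Nat) (k : String) (hk : ((["cpe", "part", "vendor", "product", "version", "update", "edition", "language"] : List String))[i]? = some k) :
    ((PySem.Dict.ofList (((["cpe", "part", "vendor", "product", "version", "update", "edition", "language"] : List String)).map (fun k => (k, ("" : String))))).update (List.zip ((["cpe", "part", "vendor", "product", "version", "update", "edition", "language"] : List String)) xs)).getD k ""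
      = xs.getD i "" := by
  rw [getD_update_zip_nodup _ xs _ zk_nodup i k hk, getD_base]

-- ---- B-side: the scanner computes positional lookups into the same split list ----

-- right-to-left characterisation of splitting on ':' : (first piece, later pieces)
def splitAux : List Char → List Char × List (List Char)
  | [] => ([], [])
  | c :: cs =>
    let p := splitAux cs
    if c = ':' then ([], p.1 :: p.2) else (c :: p.1, p.2)

theorem splitOn_go_colon (fuel : Nat) (l cur : List Char) (acc : List (List Char))
    (h : l.length ≤ fuel) :
    PySem.Chars.splitOn.go [':'] fuel l cur acc
      = acc.reverse ++ (cur.reverse ++ (splitAux l).1) :: (splitAux l).2 := by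
  induction fuel generalizing l cur acc with
  | zero =>
    have : l = [] := List.eq_nil_of_length_eq_zero (Nat.le_zero.mp h)
    subst this
    simp [PySem.Chars.splitOn.go, splitAux]
  | succ n ih =>
    cases l with
    | nil => simp [PySem.Chars.splitOn.go, splitAux]
    | cons c cs =>
      have hcs : cs.length ≤ n := by simpa using h
      by_cases hc : c = ':'
      · subst hc
        rw [show PySem.Chars.splitOn.go [':'] (n+1) (':' :: cs) cur acc
              = PySem.Chars.splitOn.go [':'] n cs [] (cur.reverse :: acc) by
            simp [PySem.Chars.splitOn.go, List.isPrefixOf]]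
        rw [ih cs [] (cur.reverse :: acc) hcs]
        simp [splitAux]
      · rw [show PySem.Chars.splitOn.go [':'] (n+1) (c :: cs) cur acc
              = PySem.Chars.splitOn.go [':'] n cs (c :: cur) acc by
            simp [PySem.Chars.splitOn.go, List.isPrefixOf]
            intro h'
            exact absurd h'.symm hc]
        rw [ih cs (c :: cur) acc hcs]
        simp [splitAux, hc]

theorem splitOn_colon (l : List Char) :
    PySem.Chars.splitOn l [':'] = (splitAux l).1 :: (splitAux l).2 := by
  have := splitOn_go_colon (l.length + 1) l [] [] (Nat.le_succ _)
  simpa [PySem.Chars.splitOn] using this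

-- placing a list of pieces into the field table starting at slot i, stopping at slot 8
def placePieces : List (List Char) → List (List Char) → Nat → List (List Char)
  | [], F, _ => F
  | p :: ps, F, i => if 8 ≤ i then F else placePieces ps (F.modify i (fun f => f ++ p)) (i + 1)

theorem place_stop (ps : List (List Char)) (F : List (List Char)) (i : Nat) (h : 8 ≤ i) :
    placePieces ps F i = F := by
  cases ps <;> simp [placePieces, h]

theorem place_cons (p : List Char) (ps : List (List Char)) (F : List (List Char)) (i : Nat)
    (h : ¬ 8 ≤ i) :
    placePieces (p :: ps) F i = placePieces ps (F.modify i (fun f => f ++ p)) (i + 1) := by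
  rw [placePieces, if_neg h]

theorem modify_nil (F : List (List Char)) (i : Nat) :
    F.modify i (fun f => f ++ []) = F := by
  have : (fun f : List Char => f ++ []) = id := by funext f; simp
  rw [this]
  exact List.modify_id i F

theorem modify_modify (F : List (List Char)) (i : Nat) (a b : List Char) :
    (F.modify i (fun f => f ++ a)).modify i (fun f => f ++ b)
      = F.modify i (fun f => f ++ (a ++ b)) := by
  apply List.ext_getElem?
  intro j
  simp [List.getElem?_modify]
  by_cases h : i = j <;> simp [h] <;> cases F[j]? <;> simp

-- the scanner is: split into pieces, then place them
theorem scan_eq_place (l : List Char) (F : List (List Char)) (i : Nat) (hi : i < 8) :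
    cpeScan l F i = placePieces ((splitAux l).1 :: (splitAux l).2) F i := by
  induction l generalizing F i with
  | nil =>
    rw [show (splitAux [] : List Char × List (List Char)) = ([], []) from rfl]
    rw [place_cons _ _ _ _ (Nat.not_le.mpr hi), modify_nil]
    rfl
  | cons c cs ih =>
    by_cases hc : c = ':'
    · subst hc
      rw [show cpeScan (':' :: cs) F i
            = if i + 1 = 8 then F else cpeScan cs F (i + 1) by simp [cpeScan]]
      rw [show splitAux (':' :: cs) = ([], (splitAux cs).1 :: (splitAux cs).2) by
        simp [splitAux]]
      rw [place_cons _ _ _ _ (Nat.not_le.mpr hi), modify_nil]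
      by_cases h8 : i + 1 = 8
      · rw [if_pos h8, h8, place_stop _ _ _ (le_refl 8)]
      · rw [if_neg h8, ih _ _ (by omega)]
    · rw [show cpeScan (c :: cs) F i
            = cpeScan cs (F.modify i (fun f => f ++ [c])) i by simp [cpeScan, hc]]
      rw [show splitAux (c :: cs) = (c :: (splitAux cs).1, (splitAux cs).2) by
        simp [splitAux, hc]]
      rw [ih _ _ hi, place_cons _ _ _ _ (Nat.not_le.mpr hi),
        place_cons _ _ _ _ (Nat.not_le.mpr hi), modify_modify]
      simp

theorem place_getElem? (ps : List (List Char)) (F : List (List Char)) (i k : Nat) :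
    (placePieces ps F i)[k]?
      = if i ≤ k ∧ k < i + ps.length ∧ k < 8
        then (fun a => a ++ ps.getD (k - i) []) <$> F[k]?
        else F[k]? := by
  induction ps generalizing F i with
  | nil => simp [placePieces]
  | cons p ps ih =>
    simp only [List.length_cons]
    by_cases h8 : 8 ≤ i
    · rw [place_stop _ _ _ h8, if_neg (by omega)]
    · rw [place_cons _ _ _ _ h8, ih]
      rcases Nat.lt_trichotomy k i with hki | hki | hki
      · have he : (F.modify i (fun f => f ++ p))[k]? = F[k]? := by
          simp [Nat.ne_of_gt hki]
        rw [he, if_neg (by omega), if_neg (by omega)]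
      · subst hki
        have he : (F.modify k (fun f => f ++ p))[k]? = (fun a => a ++ p) <$> F[k]? := by
          simp
        rw [he, if_neg (by omega), if_pos (by omega)]
        simp
      · have he : (F.modify i (fun f => f ++ p))[k]? = F[k]? := by
          simp [Nat.ne_of_lt hki]
        rw [he]
        by_cases hc : i + 1 ≤ k ∧ k < i + 1 + ps.length ∧ k < 8
        · rw [if_pos hc, if_pos (by omega)]
          rw [show (p :: ps).getD (k - i) [] = ps.getD (k - (i + 1)) [] by
            rw [show k - i = (k - (i + 1)) + 1 by omega]
            simp [List.getD]]
        · rw [if_neg hc, if_neg (by omega)]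

-- one component of B equals the positional lookup into the split pieces
theorem b_comp (s : String) (k : Nat) (hk8 : k < 8) :
    String.ofList ((cpeScan s.toList (List.replicate 8 []) 0).getD k [])
      = ((PySem.Str.split? s ":").getD []).getD k "" := by
  rw [scan_eq_place _ _ _ (by omega)]
  have hpieces : (PySem.Str.split? s ":").getD []
      = ((splitAux s.toList).1 :: (splitAux s.toList).2).map String.ofList := by
    have hsep : (":" : String).toList = [':'] := by decide
    simp [PySem.Str.split?, PySem.Chars.split?, hsep, splitOn_colon]
  set P := (splitAux s.toList).1 :: (splitAux s.toList).2 with hP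
  have hrep : (List.replicate 8 ([] : List Char))[k]? = some [] := by
    rw [List.getElem?_replicate]; simp [hk8]
  have hgd : (placePieces P (List.replicate 8 []) 0).getD k []
      = P.getD k [] := by
    rw [List.getD, place_getElem? P _ 0 k]
    by_cases hc : 0 ≤ k ∧ k < 0 + P.length ∧ k < 8
    · rw [if_pos hc, hrep]
      simp [List.getD]
    · have hlen : ¬ k < P.length := by
        intro h; exact hc ⟨Nat.zero_le _, by omega, hk8⟩
      rw [if_neg hc, hrep]
      rw [List.getD_eq_default _ _ (Nat.le_of_not_lt hlen)]
      rfl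
  rw [hgd, hpieces]
  rw [List.getD, List.getD, List.getElem?_map]
  cases P[k]? <;> simp [String.ofList] <;> rfl

theorem cpe_parser_eq_alt (s : String) : cpe_parser s = cpe_parser_alt s := by
  simp only [cpe_parser, cpe_parser_alt]
  rw [comp_eq _ 1 "part" rfl, comp_eq _ 2 "vendor" rfl, comp_eq _ 3 "product" rfl,
    comp_eq _ 4 "version" rfl, comp_eq _ 5 "update" rfl, comp_eq _ 6 "edition" rfl,
    comp_eq _ 7 "language" rfl,
    ← b_comp s 1 (by omega), ← b_comp s 2 (by omega),
    ← b_comp s 3 (by omega), ← b_comp s 4 (by omega),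
    ← b_comp s 5 (by omega), ← b_comp s 6 (by omega),
    ← b_comp s 7 (by omega)]

-- ===== VERDICT (by name: the statement is the Claim_ definition above) =====
theorem cpe_parser_spec : Claim_equal_cpe_parser := by
  intro s _
  exact cpe_parser_eq_alt s
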